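-- pv_equiv track=rewrite | github.com/pooreunblue/Coding-Algorithm | 프로그래머스/0/120869. 외계어 사전/외계어 사전.py | solution
-- ===== SOURCE A (Python) =====
-- def solution(spell, dic):
--     ans = 1
--     arr = []
--     for s in dic:
--         for c in spell:
--             if s.count(c) != 1:
--                 s = s.replace(s,'')
--         if s != '':
--             arr.append(s)
--     if len(arr) < 1:
--         ans += 1
--     return ans
-- ===== SOURCE B (Python) =====
-- def solution(spell, dic):
--     # Tally per word index how many spell entries occur exactly once in it,
--     # then a word matches iff its tally reaches len(spell) (and it is non-empty).
--     matches = {}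
--     for c in spell:
--         for i, w in enumerate(dic):
--             if w.count(c) == 1:
--                 matches[i] = matches.get(i, 0) + 1
--     for i, w in enumerate(dic):
--         if w and matches.get(i, 0) == len(spell):
--             return 1
--     return 2
-- ===== Notes on version B (the rewrite author's own statement) =====
-- stated objective: alternative
-- what changed: A destructively filters: it erases a word via s.replace(s,'') at the first failing spell entry, collects the survivors in a list and tests its length; B never mutates or collects words - it scores each word index in a dict (one increment per spell entry occurring exactly once in the word) and declares a match when a non-empty word's score reaches len(spell), with an early-return final scan.
import Mathlib
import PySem

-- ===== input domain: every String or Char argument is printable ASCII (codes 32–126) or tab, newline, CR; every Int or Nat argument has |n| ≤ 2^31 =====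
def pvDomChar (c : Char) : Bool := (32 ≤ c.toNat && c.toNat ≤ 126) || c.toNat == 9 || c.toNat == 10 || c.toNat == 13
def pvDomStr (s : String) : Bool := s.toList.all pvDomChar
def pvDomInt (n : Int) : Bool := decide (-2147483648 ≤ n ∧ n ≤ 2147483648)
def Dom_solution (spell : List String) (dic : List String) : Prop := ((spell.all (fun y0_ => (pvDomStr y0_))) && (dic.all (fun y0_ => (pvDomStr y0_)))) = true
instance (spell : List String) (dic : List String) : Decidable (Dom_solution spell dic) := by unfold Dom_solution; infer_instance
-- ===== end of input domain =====

-- B replaces A's destructive filter (erasing a word via s.replace(s,'') and collecting the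
-- survivors) by a tally: a dict scores each word index per passing spell entry, and a word
-- matches iff its score reaches len(spell); same asymptotic cost, different mechanism.


-- ===== PORT A =====
def solution (spell : List String) (dic : List String) : Int :=
  let ans : Int := 1
  let arr : List String := dic.foldl (fun arr s =>
      let s := spell.foldl (fun s c =>
          if PySem.Str.count s c ≠ 1 then PySem.Str.replace s s "" else s) s
      if s ≠ "" then arr ++ [s] else arr) []
  let ans := if arr.length < 1 then ans + 1 else ans
  ans

-- ===== PORT B =====
def solution_alt (spell : List String) (dic : List String) : Int :=
  let tally : PySem.Dict Int Int := spell.foldl (fun m c =>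
      (PySem.List.enumerate dic 0).foldl (fun m iw =>
          if PySem.Str.count iw.2 c == 1 then m.insert iw.1 (m.getD iw.1 0 + 1) else m) m)
    PySem.Dict.empty
  -- python's early-return scan over enumerate(dic) = List.any
  if (PySem.List.enumerate dic 0).any
      (fun iw => decide (iw.2 ≠ "") && (tally.getD iw.1 0 == (spell.length : Int))) then 1
  else 2

-- ===== PRECONDITION & SPEC =====
def Spec_solution (spell : List String) (dic : List String) (out : Int) : Prop := out = solution_alt spell dic
instance (spell : List String) (dic : List String) (out : Int) : Decidable (Spec_solution spell dic out) := by unfold Spec_solution; infer_instance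

-- ===== CLAIM (what is proved, stated in full; the proofs are below) =====
def Claim_equal_solution : Prop := ∀ (spell : List String) (dic : List String), Dom_solution spell dic → Spec_solution spell dic (solution spell dic)

-- ===== LEMMAS AND PROOFS =====

-- s.replace(s, '') is always '' (every string is a prefix of itself).
theorem replace_self_empty (s : String) : PySem.Str.replace s s "" = "" := by
  unfold PySem.Str.replace
  rw [show ("" : String).toList = [] from rfl]
  cases hs : s.toList with
  | nil => rfl
  | cons c t =>
    unfold PySem.Chars.replace
    simp only [List.isEmpty_cons, Bool.false_eq_true, if_false]
    unfold PySem.Chars.replace.go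
    simp [List.isPrefixOf_iff_prefix]
    unfold PySem.Chars.replace.go
    cases t <;> simp

-- the empty word stays empty through A's inner loop.
theorem inner_empty (spell : List String) :
    spell.foldl (fun s c =>
        if PySem.Str.count s c ≠ 1 then PySem.Str.replace s s "" else s) "" = "" := by
  induction spell with
  | nil => rfl
  | cons c rest ih =>
    rw [List.foldl_cons]
    split
    · rw [replace_self_empty]; exact ih
    · exact ih

-- A's inner loop: a surviving word is unchanged, a failing word becomes ''.
theorem inner_eq (spell : List String) (s : String) :
    spell.foldl (fun s c =>
        if PySem.Str.count s c ≠ 1 then PySem.Str.replace s s "" else s) s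
      = if spell.all (fun c => PySem.Str.count s c == 1) then s else "" := by
  induction spell with
  | nil => simp
  | cons c rest ih =>
    rw [List.foldl_cons, List.all_cons]
    by_cases h : PySem.Str.count s c = 1
    · rw [if_neg (not_not_intro h), ih]
      have hb : (PySem.Str.count s c == 1) = true := by simpa using h
      rw [hb, Bool.true_and]
    · rw [if_pos h, replace_self_empty, inner_empty]
      have hb : (PySem.Str.count s c == 1) = false := by simpa using h
      rw [hb, Bool.false_and, if_neg (by simp)]

-- the surviving-word predicate shared by both characterisations
def keepP (spell : List String) (s : String) : Bool :=
  decide (s ≠ "") && spell.all (fun c => PySem.Str.count s c == 1)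

-- A's outer loop builds exactly the kept words.
theorem arr_eq (spell : List String) (dic : List String) :
    dic.foldl (fun arr s =>
      let s := spell.foldl (fun s c =>
          if PySem.Str.count s c ≠ 1 then PySem.Str.replace s s "" else s) s
      if s ≠ "" then arr ++ [s] else arr) []
    = dic.filter (keepP spell) := by
  have hstep : (fun (arr : List String) s =>
      let s := spell.foldl (fun s c =>
          if PySem.Str.count s c ≠ 1 then PySem.Str.replace s s "" else s) s
      if s ≠ "" then arr ++ [s] else arr)
      = fun arr s => if keepP spell s then arr ++ [s] else arr := by
    funext arr s
    show (let s' := _; if s' ≠ "" then arr ++ [s'] else arr) = _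
    rw [inner_eq]
    cases hk : keepP spell s with
    | true =>
      unfold keepP at hk
      rw [Bool.and_eq_true, decide_eq_true_eq] at hk
      obtain ⟨hs, hall⟩ := hk
      rw [if_pos hall, if_pos hs, if_pos rfl]
    | false =>
      unfold keepP at hk
      rw [Bool.and_eq_false_iff] at hk
      cases hk with
      | inl hs =>
        rw [decide_eq_false_iff_not, not_not] at hs
        subst hs
        rw [ite_self, if_neg (by simp)]
        simp
      | inr hall =>
        rw [if_neg (ne_true_of_eq_false hall), if_neg (by simp)]
        simp
  rw [hstep]
  have := PySem.List.foldl_append_if (keepP spell) (fun s => s) dic []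
  simpa using this

-- B's inner loop over any pair list: the tally at key i grows by the number of
-- matching pairs whose index is i.
theorem inner_getD (c : String) (i : Int) :
    ∀ (l : List (Int × String)) (m : PySem.Dict Int Int),
    (l.foldl (fun m iw =>
        if PySem.Str.count iw.2 c == 1 then m.insert iw.1 (m.getD iw.1 0 + 1) else m) m).getD i 0
      = m.getD i 0 +
        ((l.filter (fun iw => iw.1 == i && (PySem.Str.count iw.2 c == 1))).length : Int) := by
  intro l
  induction l with
  | nil => intro m; simp
  | cons jw rest ih =>
    intro m
    obtain ⟨j, w⟩ := jw
    rw [List.foldl_cons, List.filter_cons]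
    dsimp only
    by_cases hq : PySem.Str.count w c = 1
    · have hqb : (PySem.Str.count w c == 1) = true := beq_iff_eq.mpr hq
      rw [hqb, Bool.and_true, if_pos rfl, ih, PySem.Dict.getD_insert]
      by_cases hi : j = i
      · subst hi
        rw [if_pos rfl, beq_self_eq_true, if_pos rfl]
        simp only [List.length_cons]
        push_cast
        ring
      · rw [if_neg (fun h => hi h.symm), beq_eq_false_iff_ne.mpr hi]
        simp only [Bool.false_eq_true, if_false]
    · have hqb : (PySem.Str.count w c == 1) = false := beq_eq_false_iff_ne.mpr hq
      rw [hqb, Bool.and_false]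
      simp only [Bool.false_eq_true, if_false]
      exact ih m

-- indices in enumerate xs s are ≥ s
theorem enum_fst_ge (xs : List String) (s : Int) (p : Int × String)
    (hp : p ∈ PySem.List.enumerate xs s) : s ≤ p.1 := by
  rw [PySem.List.mem_enumerate_iff] at hp
  obtain ⟨k, hk, rfl⟩ := hp
  dsimp only
  omega

-- for a member (i, w) of enumerate dic s, the matching pairs with index i are exactly
-- that member (indices are distinct), so the filter has length 1 or 0.
theorem enum_filter_len (c : String) :
    ∀ (dic : List String) (s i : Int) (w : String),
    (i, w) ∈ PySem.List.enumerate dic s →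
    ((PySem.List.enumerate dic s).filter
        (fun iw => iw.1 == i && (PySem.Str.count iw.2 c == 1))).length
      = if PySem.Str.count w c == 1 then 1 else 0 := by
  intro dic
  induction dic with
  | nil => intro s i w h; simp [PySem.List.enumerate_nil] at h
  | cons x xs ih =>
    intro s i w h
    rw [PySem.List.enumerate_cons] at h ⊢
    rw [List.filter_cons]
    rcases List.mem_cons.mp h with h0 | hmem
    · injection h0 with h1 h2
      subst h1
      subst h2
      have htail : (PySem.List.enumerate xs (i + 1)).filter
          (fun iw => iw.1 == i && (PySem.Str.count iw.2 c == 1)) = [] := by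
        rw [List.filter_eq_nil_iff]
        intro p hp
        have := enum_fst_ge xs (i + 1) p hp
        simp only [Bool.and_eq_true, beq_iff_eq, not_and]
        intro hpi
        omega
      by_cases hq : PySem.Str.count w c = 1
      · have hqb : (PySem.Str.count w c == 1) = true := beq_iff_eq.mpr hq
        rw [show ((i, w).1 == i && (PySem.Str.count (i, w).2 c == 1)) = true from by
          dsimp only; rw [hqb, Bool.and_true]; simp]
        rw [if_pos rfl, htail, hqb, if_pos rfl]
        rfl
      · have hqb : (PySem.Str.count w c == 1) = false := beq_eq_false_iff_ne.mpr hq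
        rw [show ((i, w).1 == i && (PySem.Str.count (i, w).2 c == 1)) = false from by
          dsimp only; rw [hqb, Bool.and_false]]
        simp only [Bool.false_eq_true, if_false]
        rw [htail, hqb]
        simp
    · have hi : i ≠ s := by
        have := enum_fst_ge xs (s + 1) (i, w) hmem
        dsimp only at this
        omega
      rw [show ((s, x).1 == i && (PySem.Str.count (s, x).2 c == 1)) = false from by
        dsimp only; rw [beq_eq_false_iff_ne.mpr (fun h' => hi h'.symm), Bool.false_and]]
      simp only [Bool.false_eq_true, if_false]
      exact ih (s + 1) i w hmem

-- the full tally at a member (i, w): the number of spell entries occurring once in w.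
theorem getD_full (spell : List String) (dic : List String) (i : Int) (w : String)
    (hmem : (i, w) ∈ PySem.List.enumerate dic 0) :
    (spell.foldl (fun m c =>
        (PySem.List.enumerate dic 0).foldl (fun m iw =>
            if PySem.Str.count iw.2 c == 1 then m.insert iw.1 (m.getD iw.1 0 + 1) else m) m)
      PySem.Dict.empty).getD i 0
    = ((spell.filter (fun c => PySem.Str.count w c == 1)).length : Int) := by
  have key : ∀ (sp : List String) (m : PySem.Dict Int Int),
      (sp.foldl (fun m c =>
        (PySem.List.enumerate dic 0).foldl (fun m iw =>
            if PySem.Str.count iw.2 c == 1 then m.insert iw.1 (m.getD iw.1 0 + 1) else m) m)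
        m).getD i 0
      = m.getD i 0 + ((sp.filter (fun c => PySem.Str.count w c == 1)).length : Int) := by
    intro sp
    induction sp with
    | nil => intro m; simp
    | cons c rest ih =>
      intro m
      rw [List.foldl_cons, ih, inner_getD, enum_filter_len c dic 0 i w hmem,
        List.filter_cons]
      by_cases hq : PySem.Str.count w c = 1
      · rw [if_pos (by simpa using hq), if_pos (by simpa using hq)]
        simp only [List.length_cons]
        push_cast
        ring
      · rw [if_neg (by simpa using hq), if_neg (by simpa using hq)]
        push_cast
        ring
  rw [key]
  simp

-- the tally reaches len(spell) iff every spell entry passes.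
theorem filter_len_eq_all (spell : List String) (w : String) :
    (((spell.filter (fun c => PySem.Str.count w c == 1)).length : Int)
        == (spell.length : Int))
      = spell.all (fun c => PySem.Str.count w c == 1) := by
  by_cases h : ∀ c ∈ spell, (PySem.Str.count w c == 1) = true
  · rw [List.filter_eq_self.mpr h, List.all_eq_true.mpr h]
    exact beq_self_eq_true _
  · have hlt : (spell.filter (fun c => PySem.Str.count w c == 1)).length < spell.length := by
      apply List.length_filter_lt_length_iff_exists.mpr
      push_neg at h
      obtain ⟨c, hc, hcc⟩ := h
      exact ⟨c, hc, by simpa using hcc⟩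
    have h2 : spell.all (fun c => PySem.Str.count w c == 1) = false := by
      rw [Bool.eq_false_iff]
      intro hall
      exact h (List.all_eq_true.mp hall)
    rw [h2, beq_eq_false_iff_ne.mpr (by omega)]

-- B's final scan agrees with "some word of dic survives".
theorem any_eq (spell : List String) (dic : List String) :
    ((PySem.List.enumerate dic 0).any (fun iw => decide (iw.2 ≠ "") &&
        ((spell.foldl (fun m c =>
            (PySem.List.enumerate dic 0).foldl (fun m iw =>
                if PySem.Str.count iw.2 c == 1 then m.insert iw.1 (m.getD iw.1 0 + 1) else m) m)
          PySem.Dict.empty).getD iw.1 0 == (spell.length : Int))))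
      = dic.any (keepP spell) := by
  rw [Bool.eq_iff_iff, List.any_eq_true, List.any_eq_true]
  constructor
  · rintro ⟨⟨i, w⟩, hmem, hp⟩
    refine ⟨w, ?_, ?_⟩
    · have := congrArg (List.map (·.2)) (rfl : PySem.List.enumerate dic 0 = _)
      have hw : w ∈ (PySem.List.enumerate dic 0).map (·.2) := List.mem_map_of_mem hmem
      rwa [PySem.List.map_snd_enumerate] at hw
    · rw [Bool.and_eq_true] at hp
      obtain ⟨h1, h2⟩ := hp
      rw [getD_full spell dic i w hmem, filter_len_eq_all] at h2
      unfold keepP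
      rw [Bool.and_eq_true]
      exact ⟨h1, h2⟩
  · rintro ⟨w, hw, hk⟩
    obtain ⟨k, hk', hwk⟩ := List.getElem_of_mem hw
    have hmem : ((0 + (k : Int)), w) ∈ PySem.List.enumerate dic 0 := by
      rw [PySem.List.mem_enumerate_iff]
      exact ⟨k, hk', by rw [hwk]⟩
    refine ⟨(0 + (k : Int), w), hmem, ?_⟩
    unfold keepP at hk
    rw [Bool.and_eq_true] at hk
    rw [Bool.and_eq_true, getD_full spell dic _ w hmem, filter_len_eq_all]
    exact ⟨hk.1, hk.2⟩

-- ===== VERDICT (by name: the statement is the Claim_ definition above) =====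
theorem solution_spec : Claim_equal_solution := by
  intro spell dic _
  show solution spell dic = solution_alt spell dic
  unfold solution solution_alt
  simp only [arr_eq]
  rw [any_eq]
  cases h : dic.any (keepP spell) with
  | true =>
    obtain ⟨w, hw, hk⟩ := List.any_eq_true.mp h
    have : dic.filter (keepP spell) ≠ [] := by
      intro hnil
      exact absurd hk (by simpa using (List.filter_eq_nil_iff.mp hnil) w hw)
    rw [if_pos rfl, if_neg (by
      cases hf : dic.filter (keepP spell) with
      | nil => exact absurd hf this
      | cons a l => simp)]
  | false =>
    have hnil : dic.filter (keepP spell) = [] := by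
      rw [List.filter_eq_nil_iff]
      intro a ha
      have := List.any_eq_false.mp h a ha
      simp [this]
    rw [hnil]
    simp
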